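-- pv_equiv track=rewrite | github.com/Rx782-Fss/auto_pt | web.py | _format_recovery_code
-- ===== SOURCE A (Python) =====
-- _RECOVERY_CODE_GROUP_SIZE = 4
--
-- def _normalize_recovery_code(code: str) -> str:
--     """统一归一化恢复码格式，去掉分隔符后再比较。"""
--     return ''.join(ch for ch in str(code or '').strip().upper() if ch.isalnum())
--
-- def _format_recovery_code(raw_code: str) -> str:
--     """把连续字符串格式化为更易抄写的分组格式。"""
--     normalized = _normalize_recovery_code(raw_code)
--     if not normalized:
--         return ''
--     return '-'.join(
--         normalized[i:i + _RECOVERY_CODE_GROUP_SIZE]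
--         for i in range(0, len(normalized), _RECOVERY_CODE_GROUP_SIZE)
--     )
-- ===== SOURCE B (Python) =====
-- def _format_recovery_code(raw_code: str) -> str:
--     """Single fused pass: normalize char-by-char and insert group separators on the fly."""
--     out = []
--     kept = 0
--     for ch in str(raw_code or '').strip().upper():
--         if ch.isalnum():
--             if kept and kept % 4 == 0:
--                 out.append('-')
--             out.append(ch)
--             kept += 1
--     return ''.join(out)
-- ===== Notes on version B (the rewrite author's own statement) =====
-- stated objective: alternative
-- what changed: Replaces the two-phase normalize-then-slice-chunk-and-join pipeline by one fused per-character pass that keeps a counter of emitted alphanumerics and inserts a hyphen whenever the counter is a positive multiple of 4.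
import Mathlib
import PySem

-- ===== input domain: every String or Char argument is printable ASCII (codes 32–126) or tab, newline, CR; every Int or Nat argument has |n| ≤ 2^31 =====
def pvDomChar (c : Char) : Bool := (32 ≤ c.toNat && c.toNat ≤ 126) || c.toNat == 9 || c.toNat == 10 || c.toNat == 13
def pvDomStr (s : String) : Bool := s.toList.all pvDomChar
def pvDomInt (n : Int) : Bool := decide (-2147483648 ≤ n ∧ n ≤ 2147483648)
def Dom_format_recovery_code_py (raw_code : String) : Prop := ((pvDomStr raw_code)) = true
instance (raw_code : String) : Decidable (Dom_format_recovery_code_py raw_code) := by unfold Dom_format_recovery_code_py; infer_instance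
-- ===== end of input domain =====

-- B fuses A's normalize-then-chunk pipeline into one per-character pass with a counter; same O(n) cost, different decomposition.

-- ===== PORT A =====
-- _normalize_recovery_code: ''.join(ch for ch in str(code or '').strip().upper() if ch.isalnum())
def normalize_recovery_code_py (code : String) : List Char :=
  (PySem.Chars.upper (PySem.Chars.strip code.toList)).filter PySem.Chars.isalnum

def format_recovery_code_py (raw_code : String) : String :=
  let normalized := normalize_recovery_code_py raw_code
  if normalized = [] then ""
  else String.mk (PySem.Chars.join ['-']
    ((PySem.List.pyRange 0 (normalized.length : Int) 4).map
      (fun i => PySem.List.slice normalized (some i) (some (i + 4)))))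

-- ===== PORT B =====
def format_recovery_code_py_alt (raw_code : String) : String :=
  let st := (PySem.Chars.upper (PySem.Chars.strip raw_code.toList)).foldl
    (fun (acc : List Char × Nat) ch =>
      if PySem.Chars.isalnum ch then
        (acc.1 ++ (if acc.2 ≠ 0 ∧ acc.2 % 4 = 0 then ['-'] else []) ++ [ch], acc.2 + 1)
      else acc) ([], 0)
  String.mk st.1

-- ===== PRECONDITION & SPEC =====
def Spec_format_recovery_code_py (raw_code : String) (out : String) : Prop := out = format_recovery_code_py_alt raw_code
instance (raw_code : String) (out : String) : Decidable (Spec_format_recovery_code_py raw_code out) := by unfold Spec_format_recovery_code_py; infer_instance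

-- ===== CLAIM (what is proved, stated in full; the proofs are below) =====
def Claim_equal_format_recovery_code_py : Prop := ∀ (raw_code : String), Dom_format_recovery_code_py raw_code → Spec_format_recovery_code_py raw_code (format_recovery_code_py raw_code)

-- ===== LEMMAS AND PROOFS =====

-- reference grouping: take 4, then '-' and recurse on the rest
def pvChunkJoin (l : List Char) : List Char :=
  if l = [] then []
  else l.take 4 ++ (if l.drop 4 = [] then [] else '-' :: pvChunkJoin (l.drop 4))
termination_by l.length
decreasing_by
  rename_i h1 h2
  simp only [List.length_drop]
  have : l ≠ [] := h1
  have h4 : l.drop 4 ≠ [] := h2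
  have : 4 < l.length := by
    by_contra hc
    exact h4 (List.drop_eq_nil_of_le (by omega))
  omega

-- reference for B's loop output, from counter c, over already-filtered chars
def pvG : List Char → Nat → List Char
  | [], _ => []
  | x :: xs, c => (if c ≠ 0 ∧ c % 4 = 0 then ['-'] else []) ++ x :: pvG xs (c + 1)

lemma pvB_foldl (l : List Char) (buf : List Char) (c : Nat) :
    (l.foldl (fun (acc : List Char × Nat) ch =>
      if PySem.Chars.isalnum ch then
        (acc.1 ++ (if acc.2 ≠ 0 ∧ acc.2 % 4 = 0 then ['-'] else []) ++ [ch], acc.2 + 1)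
      else acc) (buf, c)).1 = buf ++ pvG (l.filter PySem.Chars.isalnum) c := by
  induction l generalizing buf c with
  | nil => simp [pvG]
  | cons x xs ih =>
    by_cases hx : PySem.Chars.isalnum x
    · simp only [List.foldl_cons, List.filter_cons, hx, if_true, ite_true]
      rw [ih]
      simp [pvG, hx]
    · simp only [List.foldl_cons, List.filter_cons, hx, if_false, ite_false, Bool.false_eq_true]
      rw [ih]

lemma pvG_step (l : List Char) (c : Nat) (hl : l ≠ []) (hc : c % 4 = 0) :
    pvG l c = (if c = 0 then [] else ['-']) ++ l.take 4 ++ pvG (l.drop 4) (c + 4) := by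
  have e1 : (c+1) % 4 = 1 := by omega
  have e2 : (c+2) % 4 = 2 := by omega
  have e3 : (c+3) % 4 = 3 := by omega
  have h0 : (if c ≠ 0 ∧ c % 4 = 0 then (['-'] : List Char) else []) = (if c = 0 then [] else ['-']) := by
    by_cases hc0 : c = 0
    · simp [hc0]
    · simp [hc0, hc]
  have h4 : c + 1 + 1 + 1 + 1 = c + 4 := by omega
  rcases l with _ | ⟨a, _ | ⟨b, _ | ⟨d, _ | ⟨e, tl⟩⟩⟩⟩
  · exact absurd rfl hl
  · simp [pvG, h0]
  · simp [pvG, h0, e1]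
  · simp [pvG, h0, e1, e2]
  · simp only [pvG, h0, List.take, List.drop, h4]
    simp [e1, e2, e3]

lemma pvG_eq_chunkJoin : ∀ (n : Nat) (l : List Char) (c : Nat), l.length ≤ n → c % 4 = 0 →
    pvG l c = if l = [] then [] else (if c = 0 then [] else ['-']) ++ pvChunkJoin l := by
  intro n
  induction n with
  | zero =>
    intro l c hn _
    have : l = [] := List.eq_nil_of_length_eq_zero (by omega)
    simp [this, pvG]
  | succ n ih =>
    intro l c hn hc
    by_cases hl : l = []
    · simp [hl, pvG]
    · rw [pvG_step l c hl hc, if_neg hl]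
      by_cases hd : l.drop 4 = []
      · rw [hd]
        simp only [pvG]
        rw [pvChunkJoin, if_neg hl, if_pos hd]
        simp
      · have hlen : 4 < l.length := by
          by_contra hx
          exact hd (List.drop_eq_nil_of_le (by omega))
        rw [ih (l.drop 4) (c + 4) (by simp [List.length_drop]; omega) (by omega)]
        rw [if_neg hd, if_neg (by omega : ¬ (c + 4 = 0))]
        conv_rhs => rw [pvChunkJoin]
        rw [if_neg hl, if_neg hd]
        simp

lemma pvChunks_join : ∀ (n : Nat) (l : List Char), l.length ≤ n → l ≠ [] →
    PySem.Chars.join ['-'] ((List.range ((l.length + 3) / 4)).map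
      (fun k => (l.drop (4 * k)).take 4)) = pvChunkJoin l := by
  intro n
  induction n with
  | zero =>
    intro l hn hl
    exact absurd (List.eq_nil_of_length_eq_zero (by omega)) hl
  | succ n ih =>
    intro l hn hl
    by_cases hd : l.drop 4 = []
    · have hlen : l.length ≤ 4 := by
        by_contra hx
        have := List.length_drop (l := l) (i := 4)
        have : l.drop 4 ≠ [] := by
          intro h
          rw [h] at this
          simp at this
          omega
        exact this hd
      have hpos : 0 < l.length := List.length_pos_of_ne_nil hl
      have hq : (l.length + 3) / 4 = 1 := by omega
      rw [hq]
      simp only [List.range_one, List.map_cons, List.map_nil, Nat.mul_zero, List.drop_zero]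
      rw [PySem.Chars.join_singleton]
      rw [pvChunkJoin, if_neg hl, if_pos hd]
      simp
    · have hlen : 4 < l.length := by
        by_contra hx
        exact hd (List.drop_eq_nil_of_le (by omega))
      have hq : (l.length + 3) / 4 = ((l.drop 4).length + 3) / 4 + 1 := by
        simp only [List.length_drop]
        omega
      rw [hq, List.range_succ_eq_map]
      simp only [List.map_cons, Nat.mul_zero, List.drop_zero, List.map_map]
      have hmap : ((List.range (((l.drop 4).length + 3) / 4)).map
          ((fun k => (l.drop (4 * k)).take 4) ∘ Nat.succ)) =
          ((List.range (((l.drop 4).length + 3) / 4)).map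
          (fun k => ((l.drop 4).drop (4 * k)).take 4)) := by
        apply List.map_congr_left
        intro k _
        simp only [Function.comp_apply, List.drop_drop]
        congr 1
        · congr 1
          omega
      rw [hmap]
      have hdrop_pos : 0 < ((l.drop 4).length + 3) / 4 := by
        have := List.length_pos_of_ne_nil hd
        omega
      obtain ⟨q, hq'⟩ : ∃ q, ((l.drop 4).length + 3) / 4 = q + 1 := ⟨_, (Nat.succ_pred_eq_of_pos hdrop_pos).symm⟩
      have hcons : ∃ c cs, (List.range (((l.drop 4).length + 3) / 4)).map
          (fun k => ((l.drop 4).drop (4 * k)).take 4) = c :: cs := by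
        rw [hq', List.range_succ_eq_map]
        exact ⟨_, _, rfl⟩
      obtain ⟨c, cs, hcc⟩ := hcons
      rw [hcc, PySem.Chars.join_cons_cons]
      rw [← hcc, ih (l.drop 4) (by simp [List.length_drop]; omega) hd]
      conv_rhs => rw [pvChunkJoin]
      rw [if_neg hl, if_neg hd]
      simp

lemma pvA_chunks (l : List Char) (hl : l ≠ []) :
    (PySem.List.pyRange 0 (l.length : Int) 4).map
      (fun i => PySem.List.slice l (some i) (some (i + 4))) =
    (List.range ((l.length + 3) / 4)).map (fun k => (l.drop (4 * k)).take 4) := by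
  have hpos : 0 < l.length := List.length_pos_of_ne_nil hl
  rw [PySem.List.pyRange_of_pos 0 (l.length : Int) (by norm_num : (0:Int) < 4)]
  rw [if_pos (by exact_mod_cast hpos)]
  have hcnt : (((l.length : Int) - 0 + 4 - 1) / 4).toNat = (l.length + 3) / 4 := by
    omega
  rw [hcnt, List.map_map]
  apply List.map_congr_left
  intro k _
  simp only [Function.comp_apply, zero_add]
  have h1 : (4 : Int) * (k : Int) = ((4 * k : Nat) : Int) := by push_cast; ring
  have h2 : (4 : Int) * (k : Int) + 4 = ((4 * k + 4 : Nat) : Int) := by push_cast; ring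
  rw [h1, show (4:Int) = ((4:Nat):Int) from rfl, PySem.List.slice_natCast_add]

-- ===== VERDICT (by name: the statement is the Claim_ definition above) =====
theorem format_recovery_code_py_spec : Claim_equal_format_recovery_code_py := by
  intro raw_code _
  unfold Spec_format_recovery_code_py format_recovery_code_py format_recovery_code_py_alt normalize_recovery_code_py
  simp only []
  set s := PySem.Chars.upper (PySem.Chars.strip raw_code.toList) with hs
  set ns := s.filter PySem.Chars.isalnum with hns
  rw [show ((0 : Nat) : Nat) = 0 from rfl]
  rw [pvB_foldl s [] 0]
  rw [pvG_eq_chunkJoin ns.length ns 0 le_rfl (by omega)]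
  by_cases h : ns = []
  · simp [h]
    rfl
  · rw [if_neg h, if_neg h, if_pos rfl]
    rw [pvA_chunks ns h, pvChunks_join ns.length ns le_rfl h]
    simp
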